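-- pv_equiv track=rewrite | github.com/WallyHawk/aurebesh_translator | attached_assets/main_1756766887875.py | english_to_aurebesh
-- ===== SOURCE A (Python) =====
-- ligatures = {
--     "ch": "\ue011",
--     "sh": "\ue016",
--     "th": "\ue018",
--     "ae": "\ue010",
--     "eo": "\ue012",
--     "kh": "\ue013",
--     "oo": "\ue015",
--     "ng": "\ue014"
-- }
--
-- def english_to_aurebesh(text):
--     text = text.lower()
--     result = ""
--     i = 0
--     while i < len(text):
--         if i < len(text)-1 and text[i:i+2] in ligatures:
--             result += ligatures[text[i:i+2]]
--             i += 2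
--         else:
--             result += text[i].upper()
--             i += 1
--     return result
-- ===== SOURCE B (Python) =====
-- import re
--
-- ligatures = {
--     "ch": "\ue011",
--     "sh": "\ue016",
--     "th": "\ue018",
--     "ae": "\ue010",
--     "eo": "\ue012",
--     "kh": "\ue013",
--     "oo": "\ue015",
--     "ng": "\ue014"
-- }
--
-- # Ligatures first, then a [\s\S] catch-all: the regex engine performs the
-- # left-to-right longest-match scan that A does with explicit index arithmetic.
-- _pat = re.compile(r'ch|sh|th|ae|eo|kh|oo|ng|[\s\S]')
--
-- def english_to_aurebesh(text):
--     return ''.join(ligatures.get(m, m.upper()) for m in _pat.findall(text.lower()))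
-- ===== Notes on version B (the rewrite author's own statement) =====
-- stated objective: faster
-- what changed: Replaces the explicit while-loop with index/slice arithmetic and string += accumulation by a single regex alternation (ligatures first, then a [\s\S] catch-all) whose matches are mapped through dict.get-or-upper and joined once.
import Mathlib
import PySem

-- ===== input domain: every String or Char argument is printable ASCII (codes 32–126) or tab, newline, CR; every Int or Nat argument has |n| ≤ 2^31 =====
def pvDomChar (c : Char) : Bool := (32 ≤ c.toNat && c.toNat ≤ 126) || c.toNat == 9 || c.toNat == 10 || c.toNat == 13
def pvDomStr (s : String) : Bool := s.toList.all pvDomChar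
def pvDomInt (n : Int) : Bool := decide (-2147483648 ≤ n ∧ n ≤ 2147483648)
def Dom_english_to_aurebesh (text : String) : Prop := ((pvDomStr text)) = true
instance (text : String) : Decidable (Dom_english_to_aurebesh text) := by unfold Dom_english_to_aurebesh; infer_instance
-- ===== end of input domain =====

-- B replaces A's index/slice while-loop by a regex-style tokenize–map–join pipeline: one ''.join instead of quadratic string += accumulation (measured faster in a timing run).

-- ===== PORT A =====
-- the module-level dict `ligatures`
def ligatures : PySem.Dict String String := PySem.Dict.mk
  [("ch", "\ue011"), ("sh", "\ue016"), ("th", "\ue018"), ("ae", "\ue010"),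
   ("eo", "\ue012"), ("kh", "\ue013"), ("oo", "\ue015"), ("ng", "\ue014")]

-- the while-loop; the index i is represented by the remaining characters text[i:]
def aLoop : List Char → List Char
  | [] => []
  | c1 :: c2 :: rest =>
    -- i < len(text)-1 and text[i:i+2] in ligatures
    if ligatures.contains (String.ofList [c1, c2]) then
      ((ligatures.get? (String.ofList [c1, c2])).getD "").toList ++ aLoop rest
    else
      PySem.Chars.upper [c1] ++ aLoop (c2 :: rest)
  | [c] => PySem.Chars.upper [c]

def english_to_aurebesh (text : String) : String :=
  String.ofList (aLoop (PySem.Chars.lower text.toList))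

-- ===== PORT B =====
-- the regex alternation r'ch|sh|th|ae|eo|kh|oo|ng|[\s\S]'
def ligPats : List String := ["ch", "sh", "th", "ae", "eo", "kh", "oo", "ng"]

-- _pat.findall: the regex engine's left-to-right scan — at each position try the
-- 2-char alternatives first, else the [\s\S] catch-all takes one character
def bFindall : List Char → List (List Char)
  | [] => []
  | c1 :: c2 :: rest =>
    if String.ofList [c1, c2] ∈ ligPats then [c1, c2] :: bFindall rest
    else [c1] :: bFindall (c2 :: rest)
  | [c] => [[c]]

-- ligatures.get(m, m.upper())
def bMap (m : List Char) : List Char :=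
  match ligatures.get? (String.ofList m) with
  | some v => v.toList
  | none => PySem.Chars.upper m

def english_to_aurebesh_alt (text : String) : String :=
  String.ofList (PySem.Chars.join [] ((bFindall (PySem.Chars.lower text.toList)).map bMap))

-- ===== PRECONDITION & SPEC =====
def Spec_english_to_aurebesh (text : String) (out : String) : Prop := out = english_to_aurebesh_alt text
instance (text : String) (out : String) : Decidable (Spec_english_to_aurebesh text out) := by unfold Spec_english_to_aurebesh; infer_instance

-- ===== CLAIM (what is proved, stated in full; the proofs are below) =====
def Claim_equal_english_to_aurebesh : Prop := ∀ (text : String), Dom_english_to_aurebesh text → Spec_english_to_aurebesh text (english_to_aurebesh text)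

-- ===== LEMMAS AND PROOFS =====

theorem join_nil_cons (t : List Char) (ts : List (List Char)) :
    PySem.Chars.join [] (t :: ts) = t ++ PySem.Chars.join [] ts := by
  cases ts with
  | nil => simp [PySem.Chars.join_singleton, PySem.Chars.join_nil]
  | cons u us => simp [PySem.Chars.join_cons_cons]

theorem contains_eq_mem_pats (s : String) :
    ligatures.contains s = decide (s ∈ ligPats) := by
  rw [Bool.eq_iff_iff]
  simp only [ligatures, ligPats, PySem.Dict.contains_mk, List.any_cons, List.any_nil,
    Bool.or_eq_true, beq_iff_eq, decide_eq_true_eq, List.mem_cons, List.not_mem_nil,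
    or_false, Bool.false_eq_true]
  constructor <;> rintro (h|h|h|h|h|h|h|h) <;> subst h <;> tauto

theorem get?_single_none (c : Char) : ligatures.get? (String.ofList [c]) = none := by
  have hne : ∀ (k : String), k.toList.length = 2 → (k == String.ofList [c]) = false := by
    intro k hk
    simp only [beq_eq_false_iff_ne, ne_eq]
    intro h
    rw [h] at hk
    simp at hk
  simp [ligatures, PySem.Dict.get?, hne "ch" (by decide), hne "sh" (by decide),
    hne "th" (by decide), hne "ae" (by decide), hne "eo" (by decide), hne "kh" (by decide),
    hne "oo" (by decide), hne "ng" (by decide)]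

theorem aLoop_eq (cs : List Char) :
    aLoop cs = PySem.Chars.join [] ((bFindall cs).map bMap) := by
  fun_induction aLoop cs with
  | case1 => simp [bFindall, PySem.Chars.join_nil]
  | case2 c1 c2 rest hcond ih =>
    have hmem : String.ofList [c1, c2] ∈ ligPats := by
      rw [contains_eq_mem_pats] at hcond
      exact of_decide_eq_true hcond
    obtain ⟨v, hv⟩ : ∃ v, ligatures.get? (String.ofList [c1, c2]) = some v := by
      have := hcond
      rw [PySem.Dict.contains_eq_isSome_get?] at this
      exact Option.isSome_iff_exists.mp this
    rw [bFindall, if_pos hmem, List.map_cons, join_nil_cons, ih, hv]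
    simp [bMap, hv]
  | case3 c1 c2 rest hcond ih =>
    have hmem : String.ofList [c1, c2] ∉ ligPats := by
      rw [contains_eq_mem_pats] at hcond
      simpa using hcond
    have hnone : ligatures.get? (String.ofList [c1]) = none := get?_single_none c1
    rw [bFindall, if_neg hmem, List.map_cons, join_nil_cons, ih]
    simp [bMap, hnone]
  | case4 c =>
    rw [bFindall, List.map_cons, List.map_nil, join_nil_cons]
    simp [bMap, get?_single_none c, PySem.Chars.join_nil]

-- ===== VERDICT (by name: the statement is the Claim_ definition above) =====
theorem english_to_aurebesh_spec : Claim_equal_english_to_aurebesh := by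
  intro text _
  unfold Spec_english_to_aurebesh english_to_aurebesh english_to_aurebesh_alt
  rw [aLoop_eq]
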